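-- pv_equiv track=rewrite | github.com/AdamAhem/Japanese-Flashcards | source/visualiser.py | format_english_text
-- ===== SOURCE A (Python) =====
-- def format_english_text(engs):
-- 	engtext = ''
-- 	for num, eng in enumerate(engs, start = 1):
-- 		if num == len(engs):
-- 			engtext += eng
-- 		elif num % 2 == 1:
-- 			engtext += f'{eng}, '
-- 		else:
-- 			engtext += f'{eng},\n'
-- 	return engtext
-- ===== SOURCE B (Python) =====
-- def format_english_text(engs):
--     lines = [', '.join(engs[i:i + 2]) for i in range(0, len(engs), 2)]
--     return ',\n'.join(lines)
-- ===== Notes on version B (the rewrite author's own statement) =====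
-- stated objective: simpler
-- what changed: Replaces the three-branch enumerate-and-accumulate loop by building the two-per-line chunks first and doing a nested join (', ' within a pair, ',\n' between lines).
import Mathlib
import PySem

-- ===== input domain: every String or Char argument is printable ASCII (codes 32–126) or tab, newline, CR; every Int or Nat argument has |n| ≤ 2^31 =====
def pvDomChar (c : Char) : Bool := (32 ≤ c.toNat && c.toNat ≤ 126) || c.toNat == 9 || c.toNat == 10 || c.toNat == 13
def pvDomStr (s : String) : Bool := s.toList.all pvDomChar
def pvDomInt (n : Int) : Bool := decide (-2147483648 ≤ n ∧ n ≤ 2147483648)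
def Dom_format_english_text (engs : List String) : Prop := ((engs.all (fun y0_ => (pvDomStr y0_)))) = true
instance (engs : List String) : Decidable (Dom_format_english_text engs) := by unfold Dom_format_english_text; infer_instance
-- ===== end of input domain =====

-- B builds the two-per-line chunks first and joins them (', ' inside a pair, ',\n' between lines)
-- instead of A's single three-branch enumerate-and-accumulate loop; objective: simpler.


-- ===== PORT A =====
-- A's loop body: num == len(engs) ⇒ append eng raw; odd num ⇒ append 'eng, '; even ⇒ append 'eng,\n'
def fmtStep (n : Nat) (acc : String) (p : String × Nat) : String :=
  if p.2 = n then acc ++ p.1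
  else if p.2 % 2 = 1 then acc ++ p.1 ++ ", "
  else acc ++ p.1 ++ ",\n"

def format_english_text (engs : List String) : String :=
  (engs.zipIdx 1).foldl (fmtStep engs.length) ""

-- ===== PORT B =====
-- Python's sep.join, ported directly
def joinSep (sep : String) : List String → String
  | [] => ""
  | [x] => x
  | x :: y :: ys => x ++ sep ++ joinSep sep (y :: ys)

-- consecutive chunks of two, each pair joined with ', '
def pairLines : List String → List String
  | [] => []
  | [a] => [a]
  | a :: b :: rest => joinSep ", " [a, b] :: pairLines rest

def format_english_text_alt (engs : List String) : String :=
  joinSep ",\n" (pairLines engs)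

-- ===== PRECONDITION & SPEC =====
def Spec_format_english_text (engs : List String) (out : String) : Prop := out = format_english_text_alt engs
instance (engs : List String) (out : String) : Decidable (Spec_format_english_text engs out) := by unfold Spec_format_english_text; infer_instance

-- ===== CLAIM (what is proved, stated in full; the proofs are below) =====
def Claim_equal_format_english_text : Prop := ∀ (engs : List String), Dom_format_english_text engs → Spec_format_english_text engs (format_english_text engs)

-- ===== LEMMAS AND PROOFS =====

-- the accumulator only ever gets appended to
theorem fmtStep_foldl_acc (n : Nat) (l : List (String × Nat)) (acc : String) :
    l.foldl (fmtStep n) acc = acc ++ l.foldl (fmtStep n) "" := by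
  induction l generalizing acc with
  | nil => simp
  | cons p l ih =>
    simp only [List.foldl_cons]
    rw [ih, ih (fmtStep n "" p)]
    unfold fmtStep
    split_ifs <;> simp [String.append_assoc]

-- shifting both the start index and the length bound by 2 changes nothing
theorem fmtStep_shift (l : List String) (n k : Nat) (acc : String) :
    (l.zipIdx (k + 2)).foldl (fmtStep (n + 2)) acc = (l.zipIdx k).foldl (fmtStep n) acc := by
  induction l generalizing k acc with
  | nil => simp
  | cons a l ih =>
    simp only [List.zipIdx_cons, List.foldl_cons]
    have hstep : fmtStep (n + 2) acc (a, k + 2) = fmtStep n acc (a, k) := by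
      unfold fmtStep; simp only
      by_cases h : k = n
      · simp [h]
      · have h' : ¬ (k + 2 = n + 2) := by omega
        have hm : (k + 2) % 2 = k % 2 := by omega
        simp [h, hm]
    rw [hstep]
    have := ih (k + 1) (fmtStep n acc (a, k))
    simpa using this

-- peeling one full pair off A's loop, when two more elements follow... (r ≠ [])
theorem portA_cons_cons (a b : String) (r : List String) (hr : r ≠ []) :
    format_english_text (a :: b :: r) = a ++ ", " ++ b ++ ",\n" ++ format_english_text r := by
  unfold format_english_text
  simp only [List.zipIdx_cons, List.foldl_cons, List.length_cons]
  have h1 : fmtStep (r.length + 1 + 1) "" (a, 1) = "" ++ a ++ ", " := by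
    unfold fmtStep
    simp
  have h2 : fmtStep (r.length + 1 + 1) ("" ++ a ++ ", ") (b, 1 + 1) =
      "" ++ a ++ ", " ++ b ++ ",\n" := by
    unfold fmtStep
    have hodd : ¬ ((1 + 1) % 2 = 1) := by decide
    simp [hodd]
    intro h
    exact absurd h hr
  rw [h1, h2]
  have hsh : (r.zipIdx (1 + 1 + 1)).foldl (fmtStep (r.length + 1 + 1))
        ("" ++ a ++ ", " ++ b ++ ",\n")
      = (r.zipIdx 1).foldl (fmtStep r.length) ("" ++ a ++ ", " ++ b ++ ",\n") := by
    have := fmtStep_shift r r.length 1 ("" ++ a ++ ", " ++ b ++ ",\n")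
    simpa [Nat.add_assoc] using this
  rw [hsh, fmtStep_foldl_acc]
  simp [String.append_assoc]

theorem main_eq (engs : List String) :
    format_english_text engs = format_english_text_alt engs := by
  induction engs using pairLines.induct with
  | case1 => rfl
  | case2 a =>
    simp [format_english_text, format_english_text_alt, pairLines, joinSep, fmtStep]
  | case3 a b rest ih =>
    cases hrest : rest with
    | nil =>
      simp [format_english_text, format_english_text_alt, pairLines, joinSep, fmtStep]
    | cons c rest' =>
      rw [← hrest]
      have hr : rest ≠ [] := by rw [hrest]; simp
      rw [portA_cons_cons a b rest hr, ih]
      unfold format_english_text_alt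
      simp only [pairLines]
      have hne : pairLines rest ≠ [] := by
        rw [hrest]
        cases rest' with
        | nil => simp [pairLines]
        | cons d r2 => cases r2 <;> simp [pairLines]
      cases hpl : pairLines rest with
      | nil => exact absurd hpl hne
      | cons x xs =>
        simp [joinSep, String.append_assoc]

-- ===== VERDICT (by name: the statement is the Claim_ definition above) =====
theorem format_english_text_spec : Claim_equal_format_english_text := by
  intro engs _
  unfold Spec_format_english_text
  exact main_eq engs
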